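-- pv_equiv track=rewrite | github.com/JulianaSalfity/python | parcial.py | torneo_de_gallinas
-- ===== SOURCE A (Python) =====
-- def torneo_de_gallinas(estrategias: dict[str,str]) -> dict[str,int]:
--     lista_tuplas: list[(str,str)] = estrategias.items()
--     puntajes: dict[str,int]= {}
--     for k in estrategias:
--         puntajes[k] = 0
--         for tupla in lista_tuplas:
--             if estrategias[k] == 'me desvio siempre':
--                 if k != tupla[0]:
--                     if tupla[1] == 'me desvio siempre':
--                         puntajes[k] -= 10
--                     else:
--                         puntajes[k] -= 15
--             else:
--                 if k != tupla[0]: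
--                     if tupla[1] == 'me desvio siempre':
--                         puntajes[k] += 10
--                     else:
--                         puntajes[k] -= 5
--     return puntajes
-- ===== SOURCE B (Python) =====
-- def torneo_de_gallinas(estrategias: dict[str, str]) -> dict[str, int]:
--     # O(n): count the 'me desvio siempre' players once, then score each player by a closed formula.
--     n = len(estrategias)
--     d = sum(1 for v in estrategias.values() if v == 'me desvio siempre')
--     return {
--         k: (-10 * (d - 1) - 15 * (n - d)) if v == 'me desvio siempre'
--            else (10 * d - 5 * (n - d - 1))
--         for k, v in estrategias.items()
--     }
-- ===== Notes on version B (the rewrite author's own statement) =====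
-- stated objective: faster
-- what changed: B replaces A's all-pairs double loop by a single count of 'me desvio siempre' players and a closed-form score per player; Pre_ excludes association lists with duplicate keys, which represent no Python dict (A's parameter is a dict, so its keys are necessarily distinct).
import Mathlib
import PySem

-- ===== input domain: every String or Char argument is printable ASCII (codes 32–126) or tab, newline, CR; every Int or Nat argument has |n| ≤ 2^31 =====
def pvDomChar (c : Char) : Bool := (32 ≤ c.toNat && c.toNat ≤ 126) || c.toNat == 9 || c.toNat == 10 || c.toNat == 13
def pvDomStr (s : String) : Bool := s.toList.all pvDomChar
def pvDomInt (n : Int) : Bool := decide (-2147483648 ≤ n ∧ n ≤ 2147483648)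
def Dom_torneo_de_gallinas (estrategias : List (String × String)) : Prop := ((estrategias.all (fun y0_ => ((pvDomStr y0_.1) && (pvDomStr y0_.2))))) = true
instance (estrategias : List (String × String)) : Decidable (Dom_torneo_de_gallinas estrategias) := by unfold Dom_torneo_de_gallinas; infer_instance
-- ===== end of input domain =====

-- B computes each score by a closed-form formula after one count of the 'me desvio siempre'
-- players, instead of A's all-pairs double loop (asymptotically faster).

-- ===== PORT A =====
-- In the Python, `puntajes[k]` is set to 0 and then only `puntajes[k]` is updated inside the
-- inner loop, so the inner loop is folded over an Int accumulator and inserted once at the end.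
-- `estrategias[k]` (dict lookup, k taken from the dict's own keys, so no KeyError) is
-- PySem.Dict.getD on the dict the association list denotes.
def torneo_de_gallinas (estrategias : List (String × String)) : List (String × Int) :=
  let lista_tuplas := estrategias
  let puntajes :=
    (estrategias.map Prod.fst).foldl (fun puntajes k =>
      let score := lista_tuplas.foldl (fun s tupla =>
        if PySem.Dict.getD (PySem.Dict.mk estrategias) k "" = "me desvio siempre" then
          if k ≠ tupla.1 then
            (if tupla.2 = "me desvio siempre" then s - 10 else s - 15)
          else s
        else
          if k ≠ tupla.1 then
            (if tupla.2 = "me desvio siempre" then s + 10 else s - 5)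
          else s) 0
      puntajes.insert k score) PySem.Dict.empty
  puntajes.items

-- ===== PORT B =====
def torneo_de_gallinas_alt (estrategias : List (String × String)) : List (String × Int) :=
  let n : Int := estrategias.length
  let d : Int := (estrategias.filter (fun p => p.2 = "me desvio siempre")).length
  estrategias.map (fun p =>
    (p.1, if p.2 = "me desvio siempre" then -10 * (d - 1) - 15 * (n - d)
          else 10 * d - 5 * (n - d - 1)))

-- ===== PRECONDITION & SPEC =====
-- Pre_ excludes association lists with duplicate keys: A's parameter is a Python dict, whose
-- keys are necessarily distinct, so such lists represent no input A can receive.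
def Pre_torneo_de_gallinas (estrategias : List (String × String)) : Prop :=
  (estrategias.map Prod.fst).Nodup
instance (estrategias : List (String × String)) : Decidable (Pre_torneo_de_gallinas estrategias) := by unfold Pre_torneo_de_gallinas; infer_instance
def pvWitness_torneo_de_gallinas : (List (String × String)) :=
  [("ana", "me desvio siempre"), ("bob", "nunca me desvio")]
def Spec_torneo_de_gallinas (estrategias : List (String × String)) (out : List (String × Int)) : Prop := out = torneo_de_gallinas_alt estrategias
instance (estrategias : List (String × String)) (out : List (String × Int)) : Decidable (Spec_torneo_de_gallinas estrategias out) := by unfold Spec_torneo_de_gallinas; infer_instance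

-- ===== CLAIM (what is proved, stated in full; the proofs are below) =====
def Claim_equal_torneo_de_gallinas : Prop := ∀ (estrategias : List (String × String)), Dom_torneo_de_gallinas estrategias → Pre_torneo_de_gallinas estrategias → Spec_torneo_de_gallinas estrategias (torneo_de_gallinas estrategias)

-- ===== LEMMAS AND PROOFS =====

-- contribution of one tuple to the score of a player with strategy v (A's inner-loop body)
def pvContrib (v : String) (t : String × String) : Int :=
  if v = "me desvio siempre" then (if t.2 = "me desvio siempre" then -10 else -15)
  else (if t.2 = "me desvio siempre" then 10 else -5)

-- A's inner loop is the sum of contributions of the tuples whose key is not k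
lemma pv_inner_fold (k v : String) (l : List (String × String)) (acc : Int) :
    l.foldl (fun s tupla =>
        if v = "me desvio siempre" then
          if k ≠ tupla.1 then
            (if tupla.2 = "me desvio siempre" then s - 10 else s - 15)
          else s
        else
          if k ≠ tupla.1 then
            (if tupla.2 = "me desvio siempre" then s + 10 else s - 5)
          else s) acc
      = acc + (l.map (fun t => if k = t.1 then 0 else pvContrib v t)).sum := by
  induction l generalizing acc with
  | nil => simp
  | cons t l ih =>
    simp only [List.foldl_cons, List.map_cons, List.sum_cons, ih, pvContrib]
    split_ifs <;> first | ring1 | simp_all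

lemma pv_sum_ite_zero (k : String) (f : String × String → Int) (l : List (String × String))
    (h : l.filter (fun t => k = t.1) = [(k, v)]) :
    (l.map (fun t => if k = t.1 then 0 else f t)).sum = (l.map f).sum - f (k, v) := by
  induction l with
  | nil => simp at h
  | cons t l ih =>
    by_cases hk : k = t.1
    · have hPt : (decide (k = t.1)) = true := by simp [hk]
      simp only [List.filter_cons, hPt, if_true] at h
      have hft := List.cons_eq_cons.mp h
      have hnone : ∀ t' ∈ l, ¬ (k = t'.1) := by
        intro t' ht' hkt'
        have hmem : t' ∈ l.filter (fun t => k = t.1) :=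
          List.mem_filter.mpr ⟨ht', by simpa using hkt'⟩
        rw [hft.2] at hmem; simp at hmem
      have hz : (l.map (fun t => if k = t.1 then 0 else f t)).sum = (l.map f).sum := by
        clear ih h hft
        induction l with
        | nil => simp
        | cons u l ih2 =>
          have hu := hnone u (by simp)
          simp only [List.map_cons, List.sum_cons, if_neg hu,
            ih2 (fun t' ht' => hnone t' (by simp [ht']))]
      rw [List.map_cons, List.map_cons, List.sum_cons, List.sum_cons, if_pos hk, hz, hft.1]
      ring
    · have h' : l.filter (fun t => k = t.1) = [(k, v)] := by
        simpa [hk] using h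
      simp [hk, ih h']
      ring
  
-- total contribution over a whole list, as a closed form in its length and desvio-count
lemma pv_sum_contrib (v : String) (l : List (String × String)) :
    (l.map (pvContrib v)).sum =
      if v = "me desvio siempre" then
        -10 * ((l.filter (fun p => p.2 = "me desvio siempre")).length : Int)
          - 15 * ((l.length : Int) - (l.filter (fun p => p.2 = "me desvio siempre")).length)
      else
        10 * ((l.filter (fun p => p.2 = "me desvio siempre")).length : Int)
          - 5 * ((l.length : Int) - (l.filter (fun p => p.2 = "me desvio siempre")).length) := by
  induction l with
  | nil => simp
  | cons t l ih =>
    simp only [List.map_cons, List.sum_cons, ih, pvContrib, List.filter_cons,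
      List.length_cons, decide_eq_true_eq]
    split_ifs <;> (push_cast [List.length_cons]; ring1)

-- with distinct keys, the entries whose key is p.1 are exactly [p]
lemma pv_filter_key_singleton (p : String × String) (l : List (String × String))
    (hn : (l.map Prod.fst).Nodup) (hm : p ∈ l) :
    l.filter (fun t => p.1 = t.1) = [p] := by
  induction l with
  | nil => simp at hm
  | cons t l ih =>
    simp only [List.map_cons, List.nodup_cons] at hn
    rcases List.mem_cons.mp hm with rfl | hm'
    · have : l.filter (fun t => p.1 = t.1) = [] := by
        rw [List.filter_eq_nil_iff]
        intro t' ht'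
        simp only [decide_eq_true_eq]
        intro he
        exact hn.1 (he ▸ List.mem_map_of_mem ht')
      simp [this]
    · have hne : p.1 ≠ t.1 := by
        intro he
        exact hn.1 (he ▸ List.mem_map_of_mem hm')
      simp only [List.filter_cons, decide_eq_true_eq, if_neg hne]
      exact ih hn.2 hm'

lemma pv_lookup (es : List (String × String)) (p : String × String)
    (hn : (es.map Prod.fst).Nodup) (hm : p ∈ es) :
    PySem.Dict.getD (PySem.Dict.mk es) p.1 "" = p.2 := by
  exact PySem.Dict.getD_of_mem_items _ (by simpa [PySem.Dict.items] using hm)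
    (by simpa [PySem.Dict.keys, PySem.Dict.items] using hn) ""

-- ===== VERDICT (by name: the statement is the Claim_ definition above) =====
theorem torneo_de_gallinas_spec : Claim_equal_torneo_de_gallinas := by
  intro es _hdom hpre
  unfold Spec_torneo_de_gallinas torneo_de_gallinas torneo_de_gallinas_alt
  simp only []
  rw [PySem.Dict.items_foldl_insert_fresh _ _ _ _
    (by intro a _; simp [PySem.Dict.contains_empty]) (by simpa using hpre)]
  simp only [PySem.Dict.empty, List.nil_append, List.map_map]
  apply List.map_congr_left
  intro p hp
  have hv := pv_lookup es p hpre hp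
  have hfilter := pv_filter_key_singleton p es hpre hp
  have h1 := pv_inner_fold p.1 p.2 es 0
  simp only [Function.comp, hv, h1, zero_add,
    pv_sum_ite_zero p.1 (pvContrib p.2) es (by simpa using hfilter),
    pv_sum_contrib p.2 es]
  by_cases hvm : p.2 = "me desvio siempre"
  · simp only [pvContrib, hvm, if_true]
    ring_nf
  · simp only [pvContrib, hvm, if_false]
    ring_nf
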